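-- pv_equiv track=rewrite | github.com/fatalitynt/aoc | Aoc_2025_python/day02.py | isInvalid2
-- ===== SOURCE A (Python) =====
-- def isInvalid2(x: int) -> bool:
--     starts = []
--     s = str(x)
--     for i in range(1, len(s)):
--         if s[i] == s[0]:
--             starts.append(i)
--     for st in starts:
--         if len(s) % st != 0:
--             continue
--         target = s[:st]
--         ok = True
--         for i in range(st, len(s), st):
--             cur = s[i:i+st]
--             if cur != target:
--                 ok = False
--                 break
--         if ok:
--             return True
--     return False
-- ===== SOURCE B (Python) =====
-- def isInvalid2(x: int) -> bool:
--     s = str(x)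
--     return s in (s + s)[1:-1]
-- ===== Notes on version B (the rewrite author's own statement) =====
-- stated objective: idiomatic
-- what changed: A's explicit enumeration of candidate periods (positions matching the first character, divisor test, chunk-by-chunk comparison) is replaced by the standard string-periodicity idiom: s is a repetition of a proper prefix iff s occurs in (s+s)[1:-1].
import Mathlib
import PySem

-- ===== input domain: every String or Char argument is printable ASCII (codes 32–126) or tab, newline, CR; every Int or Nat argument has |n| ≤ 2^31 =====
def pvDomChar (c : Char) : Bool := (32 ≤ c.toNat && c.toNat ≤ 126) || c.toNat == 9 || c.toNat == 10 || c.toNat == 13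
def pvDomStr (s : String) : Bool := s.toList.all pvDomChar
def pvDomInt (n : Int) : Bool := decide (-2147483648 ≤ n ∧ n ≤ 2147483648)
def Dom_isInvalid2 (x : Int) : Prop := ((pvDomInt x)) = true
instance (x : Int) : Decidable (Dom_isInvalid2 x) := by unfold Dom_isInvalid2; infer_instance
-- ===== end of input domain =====

-- B replaces A's loop over candidate periods by the standard periodicity idiom str(x) in (str(x)+str(x))[1:-1] (objective: idiomatic/simpler).

-- ===== PORT A =====
-- the 'for st in starts' loop with its early 'return True' / 'continue'
def isInvalid2Loop (s : List Char) : List Int → Bool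
  | [] => false
  | st :: rest =>
    if PySem.Int.mod (PySem.List.len s) st ≠ 0 then isInvalid2Loop s rest
    else
      let target := PySem.List.slice s none (some st)
      let ok := (PySem.List.pyRange st (PySem.List.len s) st).foldl
        (fun ok i => ok && (PySem.List.slice s (some i) (some (i + st)) == target)) true
      if ok then true else isInvalid2Loop s rest

def isInvalid2 (x : Int) : Bool :=
  let s := PySem.Int.toChars x
  let starts := (PySem.List.pyRange 1 (PySem.List.len s) 1).foldl
    (fun acc i => if PySem.List.pyGet? s i == PySem.List.pyGet? s 0 then acc ++ [i] else acc)
    ([] : List Int)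
  isInvalid2Loop s starts

-- ===== PORT B =====
def isInvalid2_alt (x : Int) : Bool :=
  let s := PySem.Int.toChars x
  PySem.Chars.isIn s (PySem.List.slice (s ++ s) (some 1) (some (-1)))

-- ===== PRECONDITION & SPEC =====
def Spec_isInvalid2 (x : Int) (out : Bool) : Prop := out = isInvalid2_alt x
instance (x : Int) (out : Bool) : Decidable (Spec_isInvalid2 x out) := by unfold Spec_isInvalid2; infer_instance

-- ===== CLAIM (what is proved, stated in full; the proofs are below) =====
def Claim_equal_isInvalid2 : Prop := ∀ (x : Int), Dom_isInvalid2 x → Spec_isInvalid2 x (isInvalid2 x)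

-- ===== LEMMAS AND PROOFS =====

-- str(x) is never the empty string
theorem toDigitsCore_ne_nil : ∀ (fuel n : Nat) (ds : List Char), (fuel ≠ 0 ∨ ds ≠ []) → Nat.toDigitsCore 10 fuel n ds ≠ [] := by
  intro fuel
  induction fuel with
  | zero => intro n ds h; rw [Nat.toDigitsCore]; tauto
  | succ f ih =>
    intro n ds _
    rw [Nat.toDigitsCore]
    split
    · simp
    · exact ih _ _ (Or.inr (by simp))

theorem toChars_ne_nil (x : Int) : PySem.Int.toChars x ≠ [] := by
  unfold PySem.Int.toChars
  split
  · simp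
  · exact toDigitsCore_ne_nil _ _ _ (Or.inl (by simp))

-- s has (cyclic) period d: every character equals the one at its index mod d
def ModChar (d : Nat) (s : List Char) : Prop := ∀ i, i < s.length → s.getD i ' ' = s.getD (i % d) ' '

-- the common characterisation both ports are reduced to
def Core (s : List Char) : Prop := ∃ d : Nat, 0 < d ∧ d < s.length ∧ d ∣ s.length ∧ ModChar d s

-- the body condition A tests for a candidate st (mod check + chunk scan)
def CondA (s : List Char) (st : Int) : Prop :=
  PySem.Int.mod (PySem.List.len s) st = 0 ∧
  ((PySem.List.pyRange st (PySem.List.len s) st).foldl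
    (fun ok i => ok && (PySem.List.slice s (some i) (some (i + st)) == PySem.List.slice s none (some st))) true) = true

theorem foldl_and_eq (q : Int → Bool) (l : List Int) (b : Bool) :
    l.foldl (fun ok i => ok && q i) b = (b && l.all q) := by
  induction l generalizing b with
  | nil => simp
  | cons a l ih => simp [ih, Bool.and_assoc]

theorem loop_iff (s : List Char) (l : List Int) :
    isInvalid2Loop s l = true ↔ ∃ st ∈ l, CondA s st := by
  induction l with
  | nil => simp [isInvalid2Loop]
  | cons a l ih =>
    simp only [isInvalid2Loop, List.exists_mem_cons_iff]
    split_ifs with h1 h2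
    · rw [ih]
      constructor
      · rintro ⟨st, hm, hc⟩; exact Or.inr ⟨st, hm, hc⟩
      · rintro (hc | ⟨st, hm, hc⟩)
        · exact absurd hc.1 h1
        · exact ⟨st, hm, hc⟩
    · simp only [true_iff]
      exact Or.inl ⟨not_not.mp (by simpa using h1), h2⟩
    · rw [ih]
      constructor
      · rintro ⟨st, hm, hc⟩; exact Or.inr ⟨st, hm, hc⟩
      · rintro (hc | ⟨st, hm, hc⟩)
        · exact absurd hc.2 h2
        · exact ⟨st, hm, hc⟩

theorem chunk_of_mod (s : List Char) (d : Nat) (hd : 0 < d) (hdvd : d ∣ s.length) (h : ModChar d s) :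
    ∀ j, d ≤ j → j < s.length → d ∣ j → (s.drop j).take d = s.take d := by
  intro j _ hjn hdj
  have hjd : j + d ≤ s.length := by
    obtain ⟨u, hu⟩ := hdj
    obtain ⟨v, hv⟩ := hdvd
    have : u < v := by nlinarith [hu, hv, hjn]
    nlinarith
  apply List.ext_getElem
  · simp; omega
  · intro t h1 h2
    have ht : t < d := by simp at h2; omega
    have htn : j + t < s.length := by omega
    have e1 : s.getD (j + t) ' ' = s.getD ((j + t) % d) ' ' := h (j + t) htn
    obtain ⟨m, hm⟩ := hdj
    have e2 : (j + t) % d = t % d := by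
      rw [hm, Nat.mul_add_mod]
    have e3 : t % d = t := Nat.mod_eq_of_lt ht
    rw [List.getElem_take, List.getElem_drop, List.getElem_take]
    have g1 : s.getD (j + t) ' ' = s[j + t] := List.getD_eq_getElem s ' ' htn
    have g2 : s.getD t ' ' = s[t] := List.getD_eq_getElem s ' ' (by omega)
    rw [← g1, ← g2, e1, e2, e3]

theorem mod_of_chunks (s : List Char) (d : Nat) (hd : 0 < d) (hdvd : d ∣ s.length)
    (hch : ∀ j, d ≤ j → j < s.length → d ∣ j → (s.drop j).take d = s.take d) : ModChar d s := by
  intro i hi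
  by_cases hid : i < d
  · rw [Nat.mod_eq_of_lt hid]
  · push_neg at hid
    set j := d * (i / d) with hj
    have hdj : d ∣ j := Dvd.intro _ rfl
    have hji : j ≤ i := Nat.mul_div_le i d
    have hjlt : j < s.length := lt_of_le_of_lt hji hi
    have hdle : d ≤ j := by
      have : 1 ≤ i / d := Nat.one_le_div_iff hd |>.mpr hid
      calc d = d * 1 := (mul_one d).symm
        _ ≤ j := Nat.mul_le_mul_left d this
    have heq := hch j hdle hjlt hdj
    have hr : i % d < d := Nat.mod_lt _ hd
    have hx : j + i % d = i := by
      rw [hj, Nat.add_comm]; exact Nat.mod_add_div i d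
    have h2 : ((s.drop j).take d)[(i % d)]? = (s.take d)[(i % d)]? := by rw [heq]
    rw [List.getElem?_take, List.getElem?_drop, List.getElem?_take, hx] at h2
    simp only [if_pos hr] at h2
    rw [List.getD_eq_getElem?_getD, List.getD_eq_getElem?_getD, h2]

theorem rotate_of_mod (s : List Char) (d : Nat) (hd : 0 < d) (hdn : d ≤ s.length)
    (hdvd : d ∣ s.length) (h : ModChar d s) : s.rotate d = s := by
  have gd : ∀ (k : Nat) (hk : k < s.length), s[k] = s.getD k ' ' :=
    fun k hk => (List.getD_eq_getElem s ' ' hk).symm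
  rw [List.rotate_eq_drop_append_take hdn]
  apply List.ext_getElem
  · simp; omega
  · intro i h1 h2
    obtain ⟨m, hm⟩ : d ∣ s.length - d := Nat.dvd_sub hdvd dvd_rfl
    by_cases hcase : i < s.length - d
    · rw [List.getElem_append_left (by simp; omega)]
      rw [List.getElem_drop]
      rw [gd (d + i) (by omega), gd i h2, h (d + i) (by omega), h i h2, Nat.add_mod_left]
    · rw [List.getElem_append_right (by simp; omega)]
      simp only [List.length_drop]
      rw [List.getElem_take]
      rw [gd _ (by omega), gd i h2, h (i - (s.length - d)) (by omega), h i h2]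
      congr 1
      conv_rhs => rw [show i = (i - (s.length - d)) + d * m from by omega]
      rw [Nat.add_mul_mod_self_left]

theorem per_of_rotate (s : List Char) (d : Nat) (hdn : d ≤ s.length) (h : s.rotate d = s) :
    ∀ j, j < s.length - d → s.getD (d + j) ' ' = s.getD j ' ' := by
  have hda : s.drop d ++ s.take d = s := by rw [← List.rotate_eq_drop_append_take hdn, h]
  have h2 : s.drop d = s.take (s.length - d) := by
    calc s.drop d = (s.drop d ++ s.take d).take (s.length - d) := by
          rw [List.take_left' (by simp)]
      _ = s.take (s.length - d) := by rw [hda]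
  intro j hj
  have h3 := congrArg (fun l => l[j]?) h2
  simp only [List.getElem?_drop, List.getElem?_take, if_pos hj] at h3
  rw [List.getD_eq_getElem?_getD, List.getD_eq_getElem?_getD, h3]

theorem per_to_mod (s : List Char) (d : Nat) (hd : 0 < d)
    (per : ∀ j, j < s.length - d → s.getD (d + j) ' ' = s.getD j ' ') : ModChar d s := by
  intro i
  induction i using Nat.strong_induction_on with
  | _ i ih =>
    intro hi
    by_cases hc : i < d
    · rw [Nat.mod_eq_of_lt hc]
    · push_neg at hc
      have h1 : s.getD i ' ' = s.getD (i - d) ' ' := by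
        have hp := per (i - d) (by omega)
        rw [show d + (i - d) = i from by omega] at hp
        exact hp
      have h2 := ih (i - d) (by omega) (by omega)
      rw [h1, h2]
      congr 1
      conv_rhs => rw [show i = (i - d) + d from by omega]
      rw [Nat.add_mod_right]

theorem rot_mul (s : List Char) (k : Nat) (h : s.rotate k = s) : ∀ q, s.rotate (q * k) = s := by
  intro q
  induction q with
  | zero => simp
  | succ q ih => rw [Nat.succ_mul, ← List.rotate_rotate, ih, h]

theorem euclid (s : List Char) : ∀ k, 0 < k → k < s.length → s.rotate k = s →
    ∃ d, 0 < d ∧ d < s.length ∧ d ∣ s.length ∧ s.rotate d = s := by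
  intro k
  induction k using Nat.strong_induction_on with
  | _ k ih =>
    intro hk hkn hrot
    rcases Nat.eq_zero_or_pos (s.length % k) with h0 | hpos
    · exact ⟨k, hk, hkn, Nat.dvd_of_mod_eq_zero h0, hrot⟩
    · have hq : s.rotate (s.length / k * k) = s := rot_mul s k hrot _
      have hadd := List.rotate_rotate s (s.length / k * k) (s.length % k)
      rw [hq, Nat.div_add_mod', List.rotate_length] at hadd
      exact ih (s.length % k) (Nat.mod_lt _ hk) hpos (lt_trans (Nat.mod_lt _ hk) hkn) hadd

theorem condA_iff (s : List Char) (d : Nat) (hd : 0 < d) (hdn : d < s.length) :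
    CondA s (d : Int) ↔ d ∣ s.length ∧ ∀ j : Nat, d ≤ j → j < s.length → d ∣ j → (s.drop j).take d = s.take d := by
  unfold CondA
  rw [foldl_and_eq, Bool.true_and, PySem.Int.mod_eq_zero_iff_dvd, List.all_eq_true]
  simp only [PySem.List.len_eq]
  constructor
  · rintro ⟨hdvd, hall⟩
    refine ⟨by exact_mod_cast hdvd, ?_⟩
    intro j hdj hjn hdvdj
    have hmem : (j : Int) ∈ PySem.List.pyRange (d : Int) (s.length : Int) (d : Int) := by
      rw [PySem.List.mem_pyRange_iff_of_pos (by exact_mod_cast hd)]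
      refine ⟨by exact_mod_cast hdj, by exact_mod_cast hjn, ?_⟩
      exact dvd_sub (by exact_mod_cast hdvdj) dvd_rfl
    have hin := hall _ hmem
    rw [PySem.List.slice_natCast_add, PySem.List.slice_to_natCast, beq_iff_eq] at hin
    exact hin
  · rintro ⟨hdvd, hch⟩
    refine ⟨by exact_mod_cast hdvd, ?_⟩
    intro i hmem
    rw [PySem.List.mem_pyRange_iff_of_pos (by exact_mod_cast hd)] at hmem
    obtain ⟨h1, h2, h3⟩ := hmem
    lift i to Nat using (by omega)
    rw [PySem.List.slice_natCast_add, PySem.List.slice_to_natCast, beq_iff_eq]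
    have hdvdi : (d : Int) ∣ (i : Int) := by
      have := dvd_add h3 (dvd_refl (d : Int))
      rwa [sub_add_cancel] at this
    exact hch i (by exact_mod_cast h1) (by exact_mod_cast h2) (by exact_mod_cast hdvdi)

theorem A_iff_core (x : Int) : isInvalid2 x = true ↔ Core (PySem.Int.toChars x) := by
  set s := PySem.Int.toChars x with hs
  have hrw : isInvalid2 x = isInvalid2Loop s
      (List.filter (fun i => PySem.List.pyGet? s i == PySem.List.pyGet? s 0)
        (PySem.List.pyRange 1 (PySem.List.len s) 1)) := by
    rw [isInvalid2, ← hs, PySem.List.foldl_append_if_eq_filter, List.nil_append]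
  rw [hrw, loop_iff]
  constructor
  · rintro ⟨st, hmem, hcond⟩
    rw [List.mem_filter] at hmem
    obtain ⟨hmr, _⟩ := hmem
    rw [PySem.List.len_eq, PySem.List.mem_pyRange_one] at hmr
    obtain ⟨h1, h2⟩ := hmr
    lift st to Nat using (by omega)
    have hd : 0 < st := by exact_mod_cast h1
    have hdn : st < s.length := by exact_mod_cast h2
    rw [condA_iff s st hd hdn] at hcond
    exact ⟨st, hd, hdn, hcond.1, mod_of_chunks s st hd hcond.1 hcond.2⟩
  · rintro ⟨d, hd, hdn, hdvd, hmod⟩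
    have h0 : 0 < s.length := by omega
    refine ⟨(d : Int), ?_, ?_⟩
    · rw [List.mem_filter]
      refine ⟨?_, ?_⟩
      · rw [PySem.List.len_eq, PySem.List.mem_pyRange_one]
        exact ⟨by exact_mod_cast hd, by exact_mod_cast hdn⟩
      · rw [PySem.List.pyGet?_natCast, PySem.List.pyGet?_zero,
          List.getElem?_eq_getElem hdn, List.getElem?_eq_getElem h0]
        have hv := hmod d hdn
        rw [Nat.mod_self, List.getD_eq_getElem s ' ' hdn, List.getD_eq_getElem s ' ' h0] at hv
        simp [hv]
    · rw [condA_iff s d hd hdn]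
      exact ⟨hdvd, chunk_of_mod s d hd hdvd hmod⟩

-- the length-n window of s++s starting at k is the rotation by k
theorem rot_take (s : List Char) (k : Nat) (hk : k ≤ s.length) :
    ((s ++ s).drop k).take s.length = s.rotate k := by
  rw [List.drop_append_of_le_length hk, List.rotate_eq_drop_append_take hk]
  rw [List.take_append]
  congr 1
  · exact List.take_of_length_le (by simp only [List.length_drop]; omega)
  · congr 1
    simp only [List.length_drop]
    omega

theorem B_iff_rot (x : Int) : isInvalid2_alt x = true ↔
    ∃ k, 0 < k ∧ k < (PySem.Int.toChars x).length ∧ (PySem.Int.toChars x).rotate k = (PySem.Int.toChars x) := by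
  set s := PySem.Int.toChars x with hs
  have hne : s ≠ [] := toChars_ne_nil x
  have hn : 1 ≤ s.length := List.length_pos_of_ne_nil hne
  have hsl : PySem.List.slice (s ++ s) (some 1) (some (-1)) = ((s ++ s).drop 1).take (2 * s.length - 2) := by
    simp [PySem.List.slice, PySem.List.clampIdx, show ¬((s.length:Int) + s.length < 1) from by omega]
    rw [show min 1 (s.length + s.length) = 1 from by omega,
      show ((s.length:Int) + s.length + (-1)).toNat - 1 = 2 * s.length - 2 from by omega,
      List.drop_one]
  have halt : isInvalid2_alt x = PySem.Chars.isIn s (((s ++ s).drop 1).take (2 * s.length - 2)) := by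
    rw [isInvalid2_alt, ← hs, hsl]
  rw [halt, ← PySem.Chars.exists_prefix_drop_iff_isIn]
  constructor
  · rintro ⟨j, hpre⟩
    have hlen := hpre.length_le
    rw [List.length_drop, List.length_take, List.length_drop, List.length_append] at hlen
    have hj : j ≤ s.length - 2 ∧ 2 ≤ s.length := by omega
    refine ⟨j + 1, by omega, by omega, ?_⟩
    rw [List.drop_take, List.drop_drop] at hpre
    rw [List.prefix_take_iff] at hpre
    have hp := hpre.1
    rw [List.prefix_iff_eq_take] at hp
    rw [Nat.add_comm 1 j] at hp
    rw [← rot_take s (j + 1) (by omega)]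
    exact hp.symm
  · rintro ⟨k, hk, hkn, hrot⟩
    refine ⟨k - 1, ?_⟩
    rw [List.drop_take, List.drop_drop, List.prefix_take_iff]
    have h1k : 1 + (k - 1) = k := by omega
    rw [h1k]
    constructor
    · rw [List.prefix_iff_eq_take, rot_take s k (by omega), hrot]
    · omega

theorem core_iff_rot (s : List Char) :
    Core s ↔ ∃ k, 0 < k ∧ k < s.length ∧ s.rotate k = s := by
  constructor
  · rintro ⟨d, hd, hdn, hdvd, hmod⟩
    exact ⟨d, hd, hdn, rotate_of_mod s d hd (le_of_lt hdn) hdvd hmod⟩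
  · rintro ⟨k, hk, hkn, hrot⟩
    obtain ⟨d, hd, hdn, hdvd, hrotd⟩ := euclid s k hk hkn hrot
    exact ⟨d, hd, hdn, hdvd, per_to_mod s d hd (per_of_rotate s d (le_of_lt hdn) hrotd)⟩

-- ===== VERDICT (by name: the statement is the Claim_ definition above) =====
theorem isInvalid2_spec : Claim_equal_isInvalid2 := by
  intro x _
  unfold Spec_isInvalid2
  rw [Bool.eq_iff_iff, A_iff_core, B_iff_rot, core_iff_rot]
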